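-- pv_equiv track=rewrite | github.com/AdamH12113/AdventOfCode2019 | Day4.py | check_password2
-- ===== SOURCE A (Python) =====
-- def check_password2(pw):
-- 	d = [(pw // (10 ** n)) % 10 for n in range(5, -1, -1)]
--
-- 	if d[0] <= d[1] and d[1] <= d[2] and d[2] <= d[3] and d[3] <= d[4] and d[4] <= d[5]:
-- 		if (d[0] == d[1] and d[1] != d[2]) or \
-- 		  (d[1] == d[2] and d[0] != d[1] and d[2] != d[3]) or \
-- 		  (d[2] == d[3] and d[1] != d[2] and d[3] != d[4]) or \
-- 		  (d[3] == d[4] and d[2] != d[3] and d[4] != d[5]) or \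
-- 		  (d[4] == d[5] and d[3] != d[4]):
-- 			return True
-- 	return False
-- ===== SOURCE B (Python) =====
-- def _rle(d):
--     # run-length encode a list from the left, recursively
--     if not d:
--         return []
--     rest = _rle(d[1:])
--     if rest and rest[0][0] == d[0]:
--         return [(d[0], rest[0][1] + 1)] + rest[1:]
--     return [(d[0], 1)] + rest
--
-- def check_password2(pw):
--     d = [(pw // (10 ** n)) % 10 for n in range(5, -1, -1)]
--     mono = all(x <= y for x, y in zip(d, d[1:]))
--     return mono and any(n == 2 for _, n in _rle(d))
-- ===== Notes on version B (the rewrite author's own statement) =====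
-- stated objective: simpler
-- what changed: A's five hand-written adjacency/boundary branches for 'exactly one pair' are replaced by a recursive run-length encoding of the digit list plus a single 'some run has length exactly 2' test (monotonicity checked by one zip-adjacent pass), keeping A's arithmetic last-6-digits extraction.
import Mathlib
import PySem

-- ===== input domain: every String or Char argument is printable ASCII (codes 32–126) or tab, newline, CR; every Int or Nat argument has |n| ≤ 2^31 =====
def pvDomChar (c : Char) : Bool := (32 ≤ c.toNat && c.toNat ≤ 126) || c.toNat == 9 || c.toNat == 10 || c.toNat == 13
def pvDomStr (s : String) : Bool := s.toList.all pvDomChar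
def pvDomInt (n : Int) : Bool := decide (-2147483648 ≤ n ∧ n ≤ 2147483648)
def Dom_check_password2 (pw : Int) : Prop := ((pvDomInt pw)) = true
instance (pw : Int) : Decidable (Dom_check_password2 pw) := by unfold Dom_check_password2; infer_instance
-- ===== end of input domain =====

-- B replaces A's five explicit adjacency/boundary branches by a recursive run-length
-- encoding of the digit list ('exactly one run of length 2' test); objective: simpler.

-- ===== PORT A =====
-- d[i] on the 6-element digit list; indices 0..5 are always in range, so getD 0 is exact
def pvDig (d : List Int) (i : Int) : Int := (PySem.List.pyGet? d i).getD 0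

def check_password2 (pw : Int) : Bool :=
  -- n ∈ range(5,-1,-1) ⊆ [0,5], so 10 ** n = (10:Int) ^ n.toNat exactly
  let d : List Int := (PySem.List.pyRange 5 (-1) (-1)).map
    (fun n => PySem.Int.mod (PySem.Int.floordiv pw ((10:Int) ^ n.toNat)) 10)
  if pvDig d 0 ≤ pvDig d 1 ∧ pvDig d 1 ≤ pvDig d 2 ∧ pvDig d 2 ≤ pvDig d 3 ∧
     pvDig d 3 ≤ pvDig d 4 ∧ pvDig d 4 ≤ pvDig d 5 then
    if (pvDig d 0 = pvDig d 1 ∧ pvDig d 1 ≠ pvDig d 2) ∨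
       (pvDig d 1 = pvDig d 2 ∧ pvDig d 0 ≠ pvDig d 1 ∧ pvDig d 2 ≠ pvDig d 3) ∨
       (pvDig d 2 = pvDig d 3 ∧ pvDig d 1 ≠ pvDig d 2 ∧ pvDig d 3 ≠ pvDig d 4) ∨
       (pvDig d 3 = pvDig d 4 ∧ pvDig d 2 ≠ pvDig d 3 ∧ pvDig d 4 ≠ pvDig d 5) ∨
       (pvDig d 4 = pvDig d 5 ∧ pvDig d 3 ≠ pvDig d 4) then
      true
    else false
  else false

-- ===== PORT B =====
-- _rle from Source B: recursive left run-length encoding (d[1:] is the tail here, exact)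
def pvRle : List Int → List (Int × Int)
  | [] => []
  | x :: xs =>
    match pvRle xs with
    | (y, n) :: t => if y = x then (x, n + 1) :: t else (x, 1) :: (y, n) :: t
    | [] => [(x, 1)]

def check_password2_alt (pw : Int) : Bool :=
  let d : List Int := (PySem.List.pyRange 5 (-1) (-1)).map
    (fun n => PySem.Int.mod (PySem.Int.floordiv pw ((10:Int) ^ n.toNat)) 10)
  let mono : Bool := (d.zip (PySem.List.slice d (some 1) none)).all (fun p => p.1 ≤ p.2)
  mono && (pvRle d).any (fun p => p.2 == 2)

-- ===== PRECONDITION & SPEC =====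
def Spec_check_password2 (pw : Int) (out : Bool) : Prop := out = check_password2_alt pw
instance (pw : Int) (out : Bool) : Decidable (Spec_check_password2 pw out) := by unfold Spec_check_password2; infer_instance

-- ===== CLAIM (what is proved, stated in full; the proofs are below) =====
def Claim_equal_check_password2 : Prop := ∀ (pw : Int), Dom_check_password2 pw → Spec_check_password2 pw (check_password2 pw)

-- ===== LEMMAS AND PROOFS =====
theorem pvRange_eval : PySem.List.pyRange 5 (-1) (-1) = [5, 4, 3, 2, 1, 0] := by decide

theorem pvKey (a b c d e f : Int) :
    (if a ≤ b ∧ b ≤ c ∧ c ≤ d ∧ d ≤ e ∧ e ≤ f then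
      if (a = b ∧ b ≠ c) ∨ (b = c ∧ a ≠ b ∧ c ≠ d) ∨ (c = d ∧ b ≠ c ∧ d ≠ e) ∨
         (d = e ∧ c ≠ d ∧ e ≠ f) ∨ (e = f ∧ d ≠ e) then true else false
     else false)
    = (([a,b,c,d,e,f].zip [b,c,d,e,f]).all (fun p => p.1 ≤ p.2)
        && (pvRle [a,b,c,d,e,f]).any (fun p => p.2 == 2)) := by
  simp only [List.zip, List.zipWith, List.all]
  split_ifs <;>
    by_cases h1 : b = a <;> by_cases h2 : c = b <;> by_cases h3 : d = c <;>
    by_cases h4 : e = d <;> by_cases h5 : f = e <;>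
    simp_all [pvRle] <;> omega

theorem pvDig_eval (a b c d e f : Int) :
    pvDig [a,b,c,d,e,f] 0 = a ∧ pvDig [a,b,c,d,e,f] 1 = b ∧ pvDig [a,b,c,d,e,f] 2 = c ∧
    pvDig [a,b,c,d,e,f] 3 = d ∧ pvDig [a,b,c,d,e,f] 4 = e ∧ pvDig [a,b,c,d,e,f] 5 = f := by
  refine ⟨rfl, rfl, rfl, rfl, rfl, rfl⟩

theorem pvMain (a b c d e f : Int) :
    (if pvDig [a,b,c,d,e,f] 0 ≤ pvDig [a,b,c,d,e,f] 1 ∧ pvDig [a,b,c,d,e,f] 1 ≤ pvDig [a,b,c,d,e,f] 2 ∧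
        pvDig [a,b,c,d,e,f] 2 ≤ pvDig [a,b,c,d,e,f] 3 ∧ pvDig [a,b,c,d,e,f] 3 ≤ pvDig [a,b,c,d,e,f] 4 ∧
        pvDig [a,b,c,d,e,f] 4 ≤ pvDig [a,b,c,d,e,f] 5 then
      if (pvDig [a,b,c,d,e,f] 0 = pvDig [a,b,c,d,e,f] 1 ∧ pvDig [a,b,c,d,e,f] 1 ≠ pvDig [a,b,c,d,e,f] 2) ∨
         (pvDig [a,b,c,d,e,f] 1 = pvDig [a,b,c,d,e,f] 2 ∧ pvDig [a,b,c,d,e,f] 0 ≠ pvDig [a,b,c,d,e,f] 1 ∧ pvDig [a,b,c,d,e,f] 2 ≠ pvDig [a,b,c,d,e,f] 3) ∨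
         (pvDig [a,b,c,d,e,f] 2 = pvDig [a,b,c,d,e,f] 3 ∧ pvDig [a,b,c,d,e,f] 1 ≠ pvDig [a,b,c,d,e,f] 2 ∧ pvDig [a,b,c,d,e,f] 3 ≠ pvDig [a,b,c,d,e,f] 4) ∨
         (pvDig [a,b,c,d,e,f] 3 = pvDig [a,b,c,d,e,f] 4 ∧ pvDig [a,b,c,d,e,f] 2 ≠ pvDig [a,b,c,d,e,f] 3 ∧ pvDig [a,b,c,d,e,f] 4 ≠ pvDig [a,b,c,d,e,f] 5) ∨
         (pvDig [a,b,c,d,e,f] 4 = pvDig [a,b,c,d,e,f] 5 ∧ pvDig [a,b,c,d,e,f] 3 ≠ pvDig [a,b,c,d,e,f] 4) then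
        true
      else false
    else false)
    = (([a,b,c,d,e,f].zip (PySem.List.slice [a,b,c,d,e,f] (some 1) none)).all (fun p => p.1 ≤ p.2)
        && (pvRle [a,b,c,d,e,f]).any (fun p => p.2 == 2)) := by
  obtain ⟨h0, h1, h2, h3, h4, h5⟩ := pvDig_eval a b c d e f
  rw [PySem.List.slice_from_one]
  simp only [List.tail, h0, h1, h2, h3, h4, h5]
  exact pvKey a b c d e f

theorem check_password2_spec : Claim_equal_check_password2 := by
  intro pw _
  unfold Spec_check_password2 check_password2 check_password2_alt
  rw [pvRange_eval]
  simp only [List.map]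
  exact pvMain _ _ _ _ _ _
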